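-- pv_equiv track=rewrite | github.com/vayunekbote02/GFGPOTD | 19th April - Wifi Range/19thApril.py | wifiRange
-- ===== SOURCE A (Python) =====
-- def wifiRange(N, S, X):
--     #code here
--     count = 0
--     for i in S:
--         if i == '1':
--             count = X
--         else:
--             if count < -X + 1:
--                 return False
--             count -= 1
--
--     if count < 0:
--         return False
--     return True
-- ===== SOURCE B (Python) =====
-- def wifiRange(N, S, X):
--     # Decompose S into maximal runs of non-router characters, then check:
--     # prefix run <= X, suffix run <= X, every inner run <= 2*X.
--     gaps = []          # run lengths ended by a '1' (gaps[0] is the prefix run)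
--     run = 0
--     for c in S:
--         if c == '1':
--             gaps.append(run)
--             run = 0
--         else:
--             run += 1
--     if not gaps:       # no router at all
--         return len(S) == 0
--     if gaps[0] > X or run > X:
--         return False
--     return all(g <= 2 * X for g in gaps[1:])
-- ===== Notes on version B (the rewrite author's own statement) =====
-- stated objective: alternative
-- what changed: A threads a countdown counter through one early-returning loop; B decomposes S into the lengths of its maximal runs of non-router characters and then checks the prefix run <= X, the suffix run <= X, and every inner run <= 2*X.
import Mathlib
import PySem

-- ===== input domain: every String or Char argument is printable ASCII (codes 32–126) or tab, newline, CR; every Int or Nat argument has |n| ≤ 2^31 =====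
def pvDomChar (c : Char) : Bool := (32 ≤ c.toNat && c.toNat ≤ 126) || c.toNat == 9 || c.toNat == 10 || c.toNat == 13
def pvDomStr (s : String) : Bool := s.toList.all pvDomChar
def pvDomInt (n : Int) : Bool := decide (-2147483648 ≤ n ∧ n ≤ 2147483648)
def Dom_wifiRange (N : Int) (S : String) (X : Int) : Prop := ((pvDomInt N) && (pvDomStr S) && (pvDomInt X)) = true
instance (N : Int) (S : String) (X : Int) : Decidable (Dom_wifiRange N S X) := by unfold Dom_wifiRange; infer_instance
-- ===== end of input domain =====

-- B replaces A's early-returning countdown loop by a run-length decomposition of S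
-- (lengths of the maximal runs of non-'1' characters) followed by closed checks on
-- those runs (alternative decomposition, same cost); both are total and agree on all of Dom.

-- ===== PORT A =====
-- A's loop; returning none is A's early 'return False'.
def wifiLoopA (X : Int) : List Char → Int → Option Int
  | [], count => some count
  | c :: rest, count =>
    if c = '1' then wifiLoopA X rest X
    else if count < -X + 1 then none
    else wifiLoopA X rest (count - 1)

def wifiRange (_N : Int) (S : String) (X : Int) : Bool :=
  match wifiLoopA X S.toList 0 with
  | none => false
  | some count => !(count < 0)

-- ===== PORT B =====
-- one step of Source B's for-loop: state = (gaps, run)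
def wifiStepB (p : List Int × Int) (c : Char) : List Int × Int :=
  if c = '1' then (p.1 ++ [p.2], 0) else (p.1, p.2 + 1)

def wifiRange_alt (_N : Int) (S : String) (X : Int) : Bool :=
  let st := S.toList.foldl wifiStepB ([], 0)
  if st.1 = [] then decide ((S.toList.length : Int) = 0)
  else if PySem.List.pyGetD st.1 0 0 > X ∨ st.2 > X then false
  else (PySem.List.slice st.1 (some 1) none).all (fun g => decide (g ≤ 2 * X))

-- ===== PRECONDITION & SPEC =====
def Spec_wifiRange (N : Int) (S : String) (X : Int) (out : Bool) : Prop := out = wifiRange_alt N S X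
instance (N : Int) (S : String) (X : Int) (out : Bool) : Decidable (Spec_wifiRange N S X out) := by unfold Spec_wifiRange; infer_instance

-- ===== CLAIM (what is proved, stated in full; the proofs are below) =====
def Claim_equal_wifiRange : Prop := ∀ (N : Int) (S : String) (X : Int), Dom_wifiRange N S X → Spec_wifiRange N S X (wifiRange N S X)

-- ===== LEMMAS AND PROOFS =====

-- B's fold only ever appends to gaps: the accumulator splits off.
theorem foldB_acc (cs : List Char) : ∀ (gs : List Int) (run : Int),
    cs.foldl wifiStepB (gs, run)
      = (gs ++ (cs.foldl wifiStepB ([], run)).1, (cs.foldl wifiStepB ([], run)).2) := by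
  induction cs with
  | nil => intro gs run; simp
  | cons c rest ih =>
    intro gs run
    simp only [List.foldl_cons, wifiStepB]
    by_cases h : c = '1'
    · rw [if_pos h, if_pos h, List.nil_append, ih (gs ++ [run]) 0, ih [run] 0]
      simp
    · rw [if_neg h, if_neg h]
      exact ih gs (run + 1)

-- the run counter stays nonnegative
theorem foldB_run_nonneg (cs : List Char) : ∀ (gs : List Int) (run : Int),
    0 ≤ run → 0 ≤ (cs.foldl wifiStepB (gs, run)).2 := by
  induction cs with
  | nil => intro gs run h; simpa using h
  | cons c rest ih =>
    intro gs run h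
    simp only [List.foldl_cons, wifiStepB]
    by_cases hc : c = '1'
    · simp only [if_pos hc]; exact ih _ 0 le_rfl
    · simp only [if_neg hc]; exact ih gs (run + 1) (by omega)

-- B's fold on a router-free block
theorem foldB_noOne (cs : List Char) (h : ∀ c ∈ cs, c ≠ '1') :
    ∀ (gs : List Int) (run : Int),
      cs.foldl wifiStepB (gs, run) = (gs, run + cs.length) := by
  induction cs with
  | nil => intro gs run; simp
  | cons c rest ih =>
    intro gs run
    have hc : c ≠ '1' := h c (by simp)
    simp only [List.foldl_cons, wifiStepB, if_neg hc]
    rw [ih (fun c hc' => h c (by simp [hc'])) gs (run + 1)]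
    simp only [List.length_cons, Prod.mk.injEq, true_and]
    push_cast; ring

-- A's loop on a router-free block
theorem loopA_noOne (X : Int) (cs : List Char) (h : ∀ c ∈ cs, c ≠ '1') :
    ∀ count : Int,
      wifiLoopA X cs count
        = if cs ≠ [] ∧ count ≤ -X + cs.length - 1 then none
          else some (count - cs.length) := by
  induction cs with
  | nil => intro count; simp [wifiLoopA]
  | cons c rest ih =>
    intro count
    have hc : c ≠ '1' := h c (by simp)
    rw [wifiLoopA, if_neg hc]
    have hlen : (0:Int) ≤ rest.length := by positivity
    by_cases hcount : count < -X + 1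
    · rw [if_pos hcount, if_pos]
      refine ⟨by simp, ?_⟩
      simp only [List.length_cons]; push_cast; omega
    · rw [if_neg hcount, ih (fun c hc' => h c (by simp [hc'])) (count - 1)]
      by_cases hr : rest = []
      · subst hr
        rw [if_neg (fun h' => h'.1 rfl),
          if_neg (fun h' => absurd h'.2
            (by simp only [List.length_cons, List.length_nil]; push_cast; omega))]
        congr 1
        simp only [List.length_cons, List.length_nil]; push_cast; omega
      · by_cases hnum : count ≤ -X + (rest.length : Int)
        · rw [if_pos ⟨hr, by omega⟩,
            if_pos ⟨by simp, by simp only [List.length_cons]; push_cast; omega⟩]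
        · rw [if_neg (fun h' => absurd h'.2 (by omega)),
            if_neg (fun h' => absurd h'.2
              (by simp only [List.length_cons]; push_cast; omega))]
          congr 1
          simp only [List.length_cons]; push_cast; omega

-- A's loop through a router-free block followed by a router
theorem loopA_block (X : Int) (rest : List Char) :
    ∀ (pre : List Char), (∀ c ∈ pre, c ≠ '1') → ∀ count : Int,
      wifiLoopA X (pre ++ '1' :: rest) count
        = if pre ≠ [] ∧ count ≤ -X + pre.length - 1 then none
          else wifiLoopA X rest X := by
  intro pre
  induction pre with
  | nil => intro _ count; simp [wifiLoopA]
  | cons c p ih =>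
    intro h count
    have hc : c ≠ '1' := h c (by simp)
    rw [List.cons_append, wifiLoopA, if_neg hc]
    have hlen : (0:Int) ≤ p.length := by positivity
    by_cases hcount : count < -X + 1
    · rw [if_pos hcount, if_pos]
      refine ⟨by simp, ?_⟩
      simp only [List.length_cons]; push_cast; omega
    · rw [if_neg hcount, ih (fun c hc' => h c (by simp [hc'])) (count - 1)]
      by_cases hp : p = []
      · subst hp
        rw [if_neg (fun h' => h'.1 rfl),
          if_neg (fun h' => absurd h'.2
            (by simp only [List.length_cons, List.length_nil]; push_cast; omega))]
      · by_cases hnum : count ≤ -X + (p.length : Int)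
        · rw [if_pos ⟨hp, by omega⟩,
            if_pos ⟨by simp, by simp only [List.length_cons]; push_cast; omega⟩]
        · rw [if_neg (fun h' => absurd h'.2 (by omega)),
            if_neg (fun h' => absurd h'.2
              (by simp only [List.length_cons]; push_cast; omega))]

-- split a list containing '1' at its first '1'
theorem split_at_first_one (cs : List Char) (h1 : '1' ∈ cs) :
    ∃ pre rest, cs = pre ++ '1' :: rest ∧ (∀ c ∈ pre, c ≠ '1') := by
  set p : Char → Bool := fun c => decide (c ≠ '1') with hp
  have hdw : cs.dropWhile p ≠ [] := by
    intro hnil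
    have := List.dropWhile_eq_nil_iff.mp hnil '1' h1
    simp [hp] at this
  obtain ⟨d, ds, hds⟩ : ∃ d ds, cs.dropWhile p = d :: ds := by
    cases hcs : cs.dropWhile p with
    | nil => exact absurd hcs hdw
    | cons d ds => exact ⟨d, ds, rfl⟩
  have hd : d = '1' := by
    have hthis := List.head_dropWhile_not p hdw
    have hhd : (cs.dropWhile p).head hdw = d := by simp [hds]
    rw [hhd] at hthis
    simpa [hp] using hthis
  refine ⟨cs.takeWhile p, ds, ?_, ?_⟩
  · conv_lhs => rw [← List.takeWhile_append_dropWhile (p := p) (l := cs)]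
    rw [hds, hd]
  · intro c hc
    have := List.mem_takeWhile_imp hc
    simpa [hp] using this

-- both sides restarted after a router (A with count = X, B with an empty accumulator) agree
theorem main_aux : ∀ (n : Nat), ∀ (cs : List Char), cs.length ≤ n → ∀ X : Int,
    (match wifiLoopA X cs X with
     | none => false
     | some c => !(c < 0))
      = ((cs.foldl wifiStepB ([], 0)).1.all (fun g => decide (g ≤ 2 * X))
          && decide ((cs.foldl wifiStepB ([], 0)).2 ≤ X)) := by
  intro n
  induction n with
  | zero =>
    intro cs hlen X
    have hnil : cs = [] := List.eq_nil_of_length_eq_zero (Nat.le_zero.mp hlen)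
    subst hnil
    by_cases h : X < 0
    · simp [wifiLoopA, h, show ¬(0 ≤ X) by omega]
    · simp [wifiLoopA, h, show (0 ≤ X) by omega]
  | succ n ih =>
    intro cs hlen X
    by_cases h1 : '1' ∈ cs
    · obtain ⟨pre, rest, hcs, hpre⟩ := split_at_first_one cs h1
      subst hcs
      have hrest : rest.length ≤ n := by
        simp only [List.length_append, List.length_cons] at hlen; omega
      rw [loopA_block X rest pre hpre X,
        List.foldl_append, foldB_noOne pre hpre [] 0, List.foldl_cons]
      have hstep : wifiStepB (([] : List Int), 0 + (pre.length : Int)) '1'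
          = ([(pre.length : Int)], 0) := by simp [wifiStepB]
      rw [hstep, foldB_acc rest [(pre.length : Int)] 0]
      have hnn : 0 ≤ (rest.foldl wifiStepB ([], 0)).2 := foldB_run_nonneg rest [] 0 le_rfl
      set G := rest.foldl wifiStepB (([] : List Int), (0:Int)) with hG
      have hk : (0:Int) ≤ pre.length := by positivity
      simp only [List.singleton_append, List.all_cons]
      by_cases hC : pre ≠ [] ∧ X ≤ -X + (pre.length : Int) - 1
      · rw [if_pos hC]
        have hk1 : (1:Int) ≤ pre.length := by
          have : pre.length ≠ 0 := by simpa using hC.1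
          omega
        rw [decide_eq_false (by omega : ¬ ((pre.length : Int) ≤ 2 * X))]
        simp
      · rw [if_neg hC, ih rest hrest X, ← hG]
        by_cases hk2 : (pre.length : Int) ≤ 2 * X
        · rw [decide_eq_true hk2]
          simp [Bool.and_assoc]
        · have hpe : pre = [] := by
            by_contra hne
            exact hC ⟨hne, by omega⟩
          have hX : X < 0 := by
            rw [hpe] at hk2; simp at hk2; omega
          rw [decide_eq_false (by omega : ¬ G.2 ≤ X)]
          simp
    · have hpre : ∀ c ∈ cs, c ≠ '1' := fun c hc he => h1 (he ▸ hc)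
      rw [loopA_noOne X cs hpre X, foldB_noOne cs hpre [] 0]
      have hlen0 : (0:Int) ≤ cs.length := by positivity
      by_cases hnil : cs = []
      · subst hnil
        by_cases h : X < 0
        · simp [wifiLoopA, h, show ¬(0 ≤ X) by omega]
        · simp [wifiLoopA, h, show (0 ≤ X) by omega]
      · have h1' : (1:Int) ≤ cs.length := by
          have : cs.length ≠ 0 := by simpa using hnil
          omega
        by_cases ha : X ≤ -X + (cs.length : Int) - 1
        · rw [if_pos ⟨hnil, ha⟩]
          show false = (List.all [] (fun g => decide (g ≤ 2 * X))
            && decide ((0:Int) + (cs.length : Int) ≤ X))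
          symm
          rw [Bool.and_eq_false_iff]
          right
          rw [decide_eq_false_iff_not]
          omega
        · rw [if_neg (fun h' => ha h'.2)]
          show (!decide (X - (cs.length:Int) < 0)) = (List.all [] (fun g => decide (g ≤ 2 * X))
            && decide ((0:Int) + (cs.length : Int) ≤ X))
          by_cases hX : X - (cs.length:Int) < 0
          · rw [decide_eq_true hX, Bool.not_true]
            symm
            rw [Bool.and_eq_false_iff]
            right
            rw [decide_eq_false_iff_not]
            omega
          · rw [decide_eq_false hX, Bool.not_false]
            symm
            rw [Bool.and_eq_true]
            exact ⟨by simp, decide_eq_true (by omega)⟩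

-- ===== VERDICT (by name: the statement is the Claim_ definition above) =====
theorem wifiRange_spec : Claim_equal_wifiRange := by
  intro N S X _
  show wifiRange N S X = wifiRange_alt N S X
  unfold wifiRange wifiRange_alt
  generalize S.toList = cs
  by_cases h1 : '1' ∈ cs
  · obtain ⟨pre, rest, hsplit, hpre⟩ := split_at_first_one cs h1
    rw [hsplit, loopA_block X rest pre hpre 0,
      List.foldl_append, foldB_noOne pre hpre [] 0, List.foldl_cons]
    have hstep : wifiStepB (([] : List Int), 0 + (pre.length : Int)) '1'
        = ([(pre.length : Int)], 0) := by simp [wifiStepB]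
    rw [hstep, foldB_acc rest [(pre.length : Int)] 0]
    have hIH := main_aux rest.length rest le_rfl X
    have hnn : 0 ≤ (rest.foldl wifiStepB ([], 0)).2 := foldB_run_nonneg rest [] 0 le_rfl
    set G := rest.foldl wifiStepB (([] : List Int), (0:Int)) with hG
    have hk : (0:Int) ≤ pre.length := by positivity
    simp only [List.singleton_append]
    have hne : ((pre.length : Int) :: G.1) ≠ [] := by simp
    rw [if_neg hne, PySem.List.pyGetD_zero_cons, PySem.List.slice_from_one]
    simp only [List.tail_cons]
    by_cases hC : pre ≠ [] ∧ (0:Int) ≤ -X + (pre.length : Int) - 1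
    · rw [if_pos hC]
      have hk1 : (1:Int) ≤ pre.length := by
        have : pre.length ≠ 0 := by simpa using hC.1
        omega
      rw [if_pos (Or.inl (by omega : (pre.length : Int) > X))]
    · rw [if_neg hC, hIH]
      by_cases hcond : (pre.length : Int) > X ∨ G.2 > X
      · rw [if_pos hcond]
        rcases hcond with hkX | hGX
        · have hpe : pre = [] := by
            by_contra hne
            exact hC ⟨hne, by omega⟩
          have hX : X < 0 := by rw [hpe] at hkX; simpa using hkX
          rw [decide_eq_false (by omega : ¬ G.2 ≤ X)]
          simp
        · rw [decide_eq_false (by omega : ¬ G.2 ≤ X)]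
          simp
      · rw [if_neg hcond]
        push_neg at hcond
        rw [decide_eq_true (hcond.2 : G.2 ≤ X)]
        simp
  · have hpre : ∀ c ∈ cs, c ≠ '1' := fun c hc he => h1 (he ▸ hc)
    rw [loopA_noOne X cs hpre 0, foldB_noOne cs hpre [] 0, if_pos rfl]
    by_cases hnil : cs = []
    · subst hnil; simp
    · have h1' : (1:Int) ≤ cs.length := by
        have : cs.length ≠ 0 := by simpa using hnil
        omega
      by_cases ha : (0:Int) ≤ -X + (cs.length:Int) - 1
      · rw [if_pos ⟨hnil, ha⟩]
        show false = decide (((cs.length : Nat) : Int) = 0)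
        symm; rw [decide_eq_false_iff_not]; omega
      · rw [if_neg (fun h' => ha h'.2)]
        show (!decide ((0:Int) - (cs.length:Int) < 0)) = decide (((cs.length : Nat) : Int) = 0)
        rw [decide_eq_true (by omega : (0:Int) - (cs.length:Int) < 0), Bool.not_true]
        symm; rw [decide_eq_false_iff_not]; omega
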